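-- pv_equiv track=rewrite | github.com/RickHavinga/AdventOfCode2024 | Day5/day5.py | check
-- ===== SOURCE A (Python) =====
-- def check(update, rules, correct):
--     before=[]
--     for pageLoc, page in enumerate(update):
--         for left,right in rules:
--             if left==page and right in before:
--                 update.remove(right)
--                 update.insert(pageLoc,right)
--                 correct=False
--         before.append(page)
--     if (not correct):
--         check(update, rules, True)
--     return correct
-- ===== SOURCE B (Python) =====
-- def check(update, rules, correct):
--     # Single forward scan: map each page to the pages that must precede it;
--     # a page is misplaced exactly when some page it must precede was already seen.
--     pred = {}
--     for l, r in rules: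
--         pred.setdefault(r, []).append(l)
--     bad = set()
--     for page in update:
--         if page in bad:
--             return False
--         bad.update(pred.get(page, ()))
--     return correct
-- ===== Notes on version B (the rewrite author's own statement) =====
-- stated objective: faster
-- what changed: Replaces A's mutate-and-recurse repair loop (nested scan over rules and the 'before' prefix, with list remove/insert and a recursive re-sort pass) by one forward scan over a predecessor map built once from the rules; Pre_ excludes inputs whose rules form a cycle among the update's pages (including a self-loop on a duplicated page), on which A's recursion never returns (RecursionError).
import Mathlib
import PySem

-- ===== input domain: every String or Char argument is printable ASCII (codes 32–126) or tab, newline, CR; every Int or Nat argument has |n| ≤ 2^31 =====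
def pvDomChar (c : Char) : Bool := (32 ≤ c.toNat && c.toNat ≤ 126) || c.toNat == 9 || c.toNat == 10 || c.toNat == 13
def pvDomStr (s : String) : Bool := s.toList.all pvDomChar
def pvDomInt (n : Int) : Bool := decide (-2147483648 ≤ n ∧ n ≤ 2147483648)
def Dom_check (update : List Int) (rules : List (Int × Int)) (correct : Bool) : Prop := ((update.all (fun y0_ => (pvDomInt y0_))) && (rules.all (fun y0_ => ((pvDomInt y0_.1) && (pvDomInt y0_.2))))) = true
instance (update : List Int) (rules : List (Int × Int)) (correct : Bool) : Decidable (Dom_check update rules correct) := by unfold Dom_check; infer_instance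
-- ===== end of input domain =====

-- B replaces A's mutate-and-recurse repair loop by one forward scan over a predecessor
-- map built once from the rules (objective: faster, measured). Python A mutates `update`
-- in place (remove/insert) and B does not: the equivalence proved is about the RETURN
-- value only.
-- ===== PORT A =====
-- A mutates `update` in place (remove/insert); this file claims the RETURN value only.
-- The inner rules-loop of the Python: `page`, `pageLoc` and `before` are fixed while
-- `update` (u) and `correct` (c) change.  `(remove? u r).getD u` — the `none` branch is
-- unreachable (r ∈ before, and before's pages all stay in u: remove+insert preserves the
-- multiset), so Python's ValueError cannot occur.
def checkInner (u : List Int) (pageLoc : Nat) (page : Int) (before : List Int) :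
    List (Int × Int) → Bool → List Int × Bool
  | [], c => (u, c)
  | lr :: rest, c =>
    if lr.1 == page && before.contains lr.2 then
      checkInner (PySem.List.insert ((PySem.List.remove? u lr.2).getD u) (pageLoc : Int) lr.2)
        pageLoc page before rest false
    else checkInner u pageLoc page before rest c

-- `for pageLoc, page in enumerate(update)`: the iterator yields (i, u_current[i]) while
-- i < len(u_current); remove+insert keeps the length constant, so exactly
-- `update.length` iterations happen — the fuel; the i < length test is the pyGet? match.
def checkOuter (rules : List (Int × Int)) :
    Nat → List Int → List Int → Bool → Nat → List Int × Bool
  | 0, u, _, c, _ => (u, c)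
  | fuel+1, u, before, c, i =>
    match PySem.List.pyGet? u (i : Int) with
    | none => (u, c)
    | some page =>
      let s := checkInner u i page before rules c
      checkOuter rules fuel s.1 (before ++ [page]) s.2 (i+1)

-- The final `if not correct: check(update, rules, True)` only mutates the Python list and
-- its result is discarded, so it cannot affect the return value; Lean lists are immutable,
-- so the call is omitted — exact for the return value on Pre_check (where that recursion
-- terminates; outside Pre_check it raises RecursionError and A returns nothing).
def check (update : List Int) (rules : List (Int × Int)) (correct : Bool) : Bool :=
  (checkOuter rules update.length update [] correct 0).2

-- ===== PORT B =====
def buildPred (rules : List (Int × Int)) : PySem.Dict Int (List Int) :=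
  rules.foldl (fun d lr => d.modify lr.2 [] (· ++ [lr.1])) PySem.Dict.empty

def altGo (pred : PySem.Dict Int (List Int)) (correct : Bool) (bad : PySem.Set Int) :
    List Int → Bool
  | [] => correct
  | p :: t =>
    if PySem.Set.contains bad p then false
    else altGo pred correct (PySem.Set.update bad (pred.getD p [])) t

def check_alt (update : List Int) (rules : List (Int × Int)) (correct : Bool) : Bool :=
  altGo (buildPred rules) correct PySem.Set.empty update

-- ===== PRECONDITION & SPEC =====
-- the rules that can ever fire on this update: both pages present, and a self-loop only
-- when its page occurs at least twice
def preEdges (update : List Int) (rules : List (Int × Int)) : List (Int × Int) :=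
  rules.filter (fun lr => update.contains lr.1 && update.contains lr.2 &&
    (lr.1 != lr.2 || decide (2 ≤ update.count lr.1)))

-- standard source-elimination (Kahn) acyclicity test on the input graph
def preElim (es : List (Int × Int)) : Nat → List Int → Bool
  | 0, ns => ns.isEmpty
  | k+1, ns =>
    let rest := ns.filter (fun x => es.any (fun e => e.2 == x && ns.contains e.1))
    if rest.length == ns.length then ns.isEmpty else preElim es k rest

-- Pre_ excludes exactly the inputs on which A never returns: when the rules restricted to
-- the update's pages contain a cycle, every arrangement violates some rule of the cycle,
-- so A's final self-call repeats forever (RecursionError).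
def Pre_check (update : List Int) (rules : List (Int × Int)) (correct : Bool) : Prop :=
  preElim (preEdges update rules) (PySem.List.dedup update).length
    (PySem.List.dedup update) = true
instance (update : List Int) (rules : List (Int × Int)) (correct : Bool) :
    Decidable (Pre_check update rules correct) := by unfold Pre_check; infer_instance

def pvWitness_check : List Int × (List (Int × Int)) × Bool := ([1, 2], [(1, 2)], true)

def Spec_check (update : List Int) (rules : List (Int × Int)) (correct : Bool) (out : Bool) :
    Prop := out = check_alt update rules correct
instance (update : List Int) (rules : List (Int × Int)) (correct : Bool) (out : Bool) :
    Decidable (Spec_check update rules correct out) := by unfold Spec_check; infer_instance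

-- ===== CLAIM (what is proved, stated in full; the proofs are below) =====
def Claim_equal_check : Prop := ∀ (update : List Int) (rules : List (Int × Int)) (correct : Bool), Dom_check update rules correct → Pre_check update rules correct → Spec_check update rules correct (check update rules correct)

-- ===== LEMMAS AND PROOFS =====

-- the conflict test A performs for one yielded page against a prefix `before`
def hitB (rules : List (Int × Int)) (before : List Int) (page : Int) : Bool :=
  rules.any (fun lr => lr.1 == page && before.contains lr.2)

-- the common pure characterisation both ports are reduced to: scan the pages,
-- true iff no page conflicts with the prefix before it
def noConf (rules : List (Int × Int)) : List Int → List Int → Bool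
  | _, [] => true
  | before, p :: t => !hitB rules before p && noConf rules (before ++ [p]) t

theorem checkInner_snd (rules : List (Int × Int)) (u : List Int) (i : Nat) (page : Int)
    (before : List Int) (c : Bool) :
    (checkInner u i page before rules c).2 = (c && !hitB rules before page) := by
  induction rules generalizing u c with
  | nil => simp [checkInner, hitB]
  | cons lr rest ih =>
    by_cases hp : lr.1 = page ∧ lr.2 ∈ before
    · simp [checkInner, hitB, hp.1, hp.2, ih]
    · rcases not_and_or.mp hp with h1 | h1
      · have h1' : (lr.1 == page) = false := beq_eq_false_iff_ne.mpr h1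
        simp [checkInner, hitB, h1', ih]
      · simp [checkInner, hitB, h1, ih]

theorem checkInner_of_not_hit (rules : List (Int × Int)) (u : List Int) (i : Nat)
    (page : Int) (before : List Int) (c : Bool) (h : hitB rules before page = false) :
    checkInner u i page before rules c = (u, c) := by
  induction rules generalizing u c with
  | nil => simp [checkInner]
  | cons lr rest ih =>
    simp only [hitB, List.any_cons, Bool.or_eq_false_iff] at h
    have h1 : ¬(lr.1 = page ∧ lr.2 ∈ before) := by
      intro hp; simp [hp.1, hp.2] at h
    simp [checkInner, h1, ih _ _ h.2]

theorem checkOuter_false (rules : List (Int × Int)) (fuel : Nat) :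
    ∀ (u before : List Int) (i : Nat),
      (checkOuter rules fuel u before false i).2 = false := by
  induction fuel with
  | zero => intro u before i; simp [checkOuter]
  | succ n ih =>
    intro u before i
    simp only [checkOuter]
    cases h : PySem.List.pyGet? u (i : Int) with
    | none => simp
    | some page => simp [checkInner_snd, ih]

theorem checkOuter_true (rules : List (Int × Int)) (fuel : Nat) :
    ∀ (u before : List Int) (i : Nat), u.length = i + fuel →
      (checkOuter rules fuel u before true i).2 = noConf rules before (u.drop i) := by
  induction fuel with
  | zero =>
    intro u before i hlen
    have : u.drop i = [] := List.drop_eq_nil_of_le (by omega)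
    simp [checkOuter, this, noConf]
  | succ n ih =>
    intro u before i hlen
    have hi : i < u.length := by omega
    have hget : PySem.List.pyGet? u (i : Int) = some u[i] := by
      simp [PySem.List.pyGet?_natCast, List.getElem?_eq_getElem hi]
    have hdrop : u.drop i = u[i] :: u.drop (i + 1) := List.drop_eq_getElem_cons hi
    simp only [checkOuter, hget]
    by_cases h : hitB rules before u[i] = true
    · have hsnd : (checkInner u i u[i] before rules true).2 = false := by
        simp [checkInner_snd, h]
      rw [hsnd, checkOuter_false, hdrop]
      simp [noConf, h]
    · simp only [Bool.not_eq_true] at h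
      rw [checkInner_of_not_hit rules u i u[i] before true h]
      rw [ih u (before ++ [u[i]]) (i + 1) (by omega), hdrop]
      simp [noConf, h]

theorem check_char (update : List Int) (rules : List (Int × Int)) (c : Bool) :
    check update rules c = (c && noConf rules [] update) := by
  cases c with
  | false => simp [check, checkOuter_false]
  | true => simpa [check] using checkOuter_true rules update.length update [] 0 (by omega)

theorem buildPred_getD (rules : List (Int × Int)) (p : Int) :
    (buildPred rules).getD p [] = (rules.filter (fun lr => lr.2 == p)).map (·.1) := by
  have h : buildPred rules
      = (rules.map (fun lr => (lr.2, lr.1))).foldl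
          (fun d q => d.modify q.1 [] (· ++ [q.2])) PySem.Dict.empty := by
    simp [buildPred, List.foldl_map]
  rw [h, PySem.Dict.getD_foldl_modify_append]
  simp [PySem.Dict.getD_empty, List.filter_map, List.map_map, Function.comp_def]

theorem mem_buildPred_getD (rules : List (Int × Int)) (p q : Int) :
    q ∈ (buildPred rules).getD p [] ↔ (q, p) ∈ rules := by
  rw [buildPred_getD]
  simp only [List.mem_map, List.mem_filter, beq_iff_eq]
  constructor
  · rintro ⟨lr, ⟨hmem, h2⟩, h1⟩
    exact h1 ▸ h2 ▸ hmem
  · intro h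
    exact ⟨(q, p), ⟨h, rfl⟩, rfl⟩

theorem hitB_append (rules : List (Int × Int)) (before : List Int) (p q : Int) :
    hitB rules (before ++ [p]) q = true ↔
      hitB rules before q = true ∨ (q, p) ∈ rules := by
  simp only [hitB, List.any_eq_true, Bool.and_eq_true, beq_iff_eq,
    List.elem_eq_contains, List.contains_eq_mem, List.mem_append, List.mem_singleton,
    decide_eq_true_eq]
  constructor
  · rintro ⟨lr, hmem, h1, h2 | h2⟩
    · exact Or.inl ⟨lr, hmem, h1, h2⟩
    · right; have : lr = (q, p) := by cases lr; simp_all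
      exact this ▸ hmem
  · rintro (⟨lr, hmem, h1, h2⟩ | h)
    · exact ⟨lr, hmem, h1, Or.inl h2⟩
    · exact ⟨(q, p), h, rfl, Or.inr rfl⟩

theorem altGo_char (rules : List (Int × Int)) (pages : List Int) :
    ∀ (before : List Int) (bad : PySem.Set Int) (c : Bool),
      (∀ q, PySem.Set.contains bad q = true ↔ hitB rules before q = true) →
      altGo (buildPred rules) c bad pages = (c && noConf rules before pages) := by
  induction pages with
  | nil => intro before bad c _; simp [altGo, noConf]
  | cons p t ih =>
    intro before bad c hinv
    simp only [altGo]
    by_cases h : hitB rules before p = true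
    · rw [if_pos ((hinv p).2 h)]
      simp [noConf, h]
    · have hc : PySem.Set.contains bad p = false := by
        cases hcp : PySem.Set.contains bad p
        · rfl
        · exact absurd ((hinv p).1 hcp) h
      rw [if_neg (fun hmem => by rw [hmem] at hc; exact Bool.noConfusion hc)]
      rw [ih (before ++ [p]) _ c ?_]
      · simp only [Bool.not_eq_true] at h
        simp [noConf, h]
      · intro q
        rw [hitB_append]
        simp only [PySem.Set.contains_iff, PySem.Set.mem_update, mem_buildPred_getD]
        rw [← PySem.Set.contains_iff, hinv q]
  
theorem check_alt_char (update : List Int) (rules : List (Int × Int)) (c : Bool) :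
    check_alt update rules c = (c && noConf rules [] update) := by
  apply altGo_char
  intro q
  simp [PySem.Set.empty, hitB]

-- ===== VERDICT (by name: the statement is the Claim_ definition above) =====
theorem check_spec : Claim_equal_check := by
  intro update rules correct _ _
  unfold Spec_check
  rw [check_char, check_alt_char]
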